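-- pv_equiv track=rewrite | github.com/antoinemcgrath/govtools.org | webapps/bill_converter/convertBill2html.py | get_page_repetitions
-- ===== SOURCE A (Python) =====
-- def get_page_repetitions(all_text):
--     duplicate_lines = set([x for x in all_text if all_text.count(x) > 1])
--     all_rep_lines = []
--     for repeat in duplicate_lines:
--         reps = [index for index, value in enumerate(all_text) if value == repeat]
--         all_rep_lines += reps
--     all_rep_lines.sort()
--     return(all_rep_lines)
-- ===== SOURCE B (Python) =====
-- def get_page_repetitions(all_text):
--     counts = {}
--     for value in all_text:
--         counts[value] = counts.get(value, 0) + 1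
--     return [index for index, value in enumerate(all_text) if counts[value] > 1]
-- ===== Notes on version B (the rewrite author's own statement) =====
-- stated objective: faster
-- what changed: Replaces A's quadratic all_text.count scan per element, per-duplicate enumerate scans and final sort with a single dict counting pass followed by one index-collecting pass over enumerate (whose order is already sorted, so no sort is needed).
import Mathlib
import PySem

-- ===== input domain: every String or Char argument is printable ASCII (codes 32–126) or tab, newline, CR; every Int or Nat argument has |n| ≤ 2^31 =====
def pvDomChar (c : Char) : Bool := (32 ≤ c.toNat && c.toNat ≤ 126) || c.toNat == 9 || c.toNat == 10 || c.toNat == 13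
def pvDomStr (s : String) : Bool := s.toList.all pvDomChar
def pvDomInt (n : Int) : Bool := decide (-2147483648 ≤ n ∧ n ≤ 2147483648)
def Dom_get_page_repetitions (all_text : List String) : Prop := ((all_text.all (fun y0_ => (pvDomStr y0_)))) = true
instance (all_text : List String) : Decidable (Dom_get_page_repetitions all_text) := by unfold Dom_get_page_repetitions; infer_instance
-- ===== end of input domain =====

-- B replaces A's quadratic count()/per-duplicate scans plus final sort with one counting pass
-- over a dict and one index-collecting pass (the enumerate order is already sorted): faster by algorithm.

-- ===== PORT A =====
def get_page_repetitions (all_text : List String) : List Int :=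
  let duplicate_lines : PySem.Set String :=
    PySem.Set.ofList (all_text.filter (fun x => decide (all_text.count x > 1)))
  let all_rep_lines : List Int :=
    duplicate_lines.foldl (fun acc rep =>
      acc ++ ((PySem.List.enumerate all_text 0).filter (fun p => p.2 == rep)).map (·.1)) []
  PySem.List.sorted all_rep_lines (fun x => x) false

-- ===== PORT B =====
-- counts[value] in the comprehension is ported as getD …  0: value always comes from all_text,
-- so the key is present and getD is exact there.
def get_page_repetitions_alt (all_text : List String) : List Int :=
  let counts : PySem.Dict String Int :=
    all_text.foldl (fun d value => d.insert value (d.getD value 0 + 1)) PySem.Dict.empty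
  ((PySem.List.enumerate all_text 0).filter (fun p => decide (counts.getD p.2 0 > 1))).map (·.1)

-- ===== PRECONDITION & SPEC =====
def Spec_get_page_repetitions (all_text : List String) (out : List Int) : Prop := out = get_page_repetitions_alt all_text
instance (all_text : List String) (out : List Int) : Decidable (Spec_get_page_repetitions all_text out) := by unfold Spec_get_page_repetitions; infer_instance

-- ===== CLAIM (what is proved, stated in full; the proofs are below) =====
def Claim_equal_get_page_repetitions : Prop := ∀ (all_text : List String), Dom_get_page_repetitions all_text → Spec_get_page_repetitions all_text (get_page_repetitions all_text)

-- ===== LEMMAS AND PROOFS =====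

-- filtering by a disjunction of disjoint predicates splits, up to permutation
theorem pv_filter_or_perm {α : Type} (p q : α → Bool) (E : List α)
    (h : ∀ a, ¬(p a = true ∧ q a = true)) :
    (E.filter (fun a => p a || q a)).Perm (E.filter p ++ E.filter q) := by
  induction E with
  | nil => simp
  | cons a E ih =>
    by_cases hp : p a = true
    · have hq : q a = false := by
        cases hqa : q a
        · rfl
        · exact absurd ⟨hp, hqa⟩ (h a)
      simp [hp, hq]
      exact ih
    · simp only [Bool.not_eq_true] at hp
      by_cases hq : q a = true
      · simp [hp, hq]
        exact (ih.cons a).trans (List.Perm.symm (List.perm_middle))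
      · simp only [Bool.not_eq_true] at hq
        simp [hp, hq]
        exact ih
  
-- concatenating, over a duplicate-free list of values S, the elements of E whose key equals
-- each value, is a permutation of filtering E by key-membership in S
theorem pv_flatMap_filter_perm {α κ : Type} [DecidableEq κ] (key : α → κ)
    (S : List κ) (hS : S.Nodup) (E : List α) :
    (S.flatMap (fun v => E.filter (fun a => decide (key a = v)))).Perm
      (E.filter (fun a => decide (key a ∈ S))) := by
  induction S with
  | nil => simp
  | cons v S ih =>
    have hv : v ∉ S := (List.nodup_cons.mp hS).1
    have ih' := ih (List.nodup_cons.mp hS).2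
    have hsplit : (E.filter (fun a => decide (key a ∈ v :: S))).Perm
        (E.filter (fun a => decide (key a = v)) ++ E.filter (fun a => decide (key a ∈ S))) := by
      have := pv_filter_or_perm (fun a => decide (key a = v)) (fun a => decide (key a ∈ S)) E
        (by
          intro a ⟨h1, h2⟩
          simp at h1 h2
          exact hv (h1 ▸ h2))
      refine List.Perm.trans ?_ this
      apply List.Perm.of_eq
      apply List.filter_congr
      intro a _
      simp [List.mem_cons]
    simp only [List.flatMap_cons]
    exact ((List.Perm.append_left _ ih').trans hsplit.symm).symm.symm
  
theorem get_page_repetitions_eq (all_text : List String) :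
    get_page_repetitions all_text = get_page_repetitions_alt all_text := by
  unfold get_page_repetitions get_page_repetitions_alt
  dsimp only
  rw [PySem.List.foldl_append_eq_flatMap, List.nil_append, ← List.map_flatMap]
  have hmem : ∀ (v : String),
      (v ∈ PySem.Set.ofList (all_text.filter (fun x => decide (all_text.count x > 1)))) ↔
        all_text.count v > 1 := by
    intro v
    rw [PySem.Set.mem_ofList, List.mem_filter]
    constructor
    · intro h; simpa using h.2
    · intro h
      exact ⟨List.count_pos_iff.mp (Nat.lt_of_lt_of_le Nat.zero_lt_one (Nat.le_of_lt h)), by simpa using h⟩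
  have hfil : (PySem.List.enumerate all_text 0).filter
        (fun p => decide ((all_text.foldl (fun d value => d.insert value (d.getD value 0 + 1))
          (PySem.Dict.empty : PySem.Dict String Int)).getD p.2 0 > 1)) =
      (PySem.List.enumerate all_text 0).filter
        (fun p => decide (p.2 ∈ PySem.Set.ofList (all_text.filter (fun x => decide (all_text.count x > 1))))) := by
    apply List.filter_congr
    intro p _
    have hc : List.foldl (fun d value => d.insert value (d.getD value 0 + 1))
        PySem.Dict.empty all_text = PySem.Dict.counter all_text :=
      PySem.Dict.foldl_insert_getD_add_one_eq_counter all_text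
    rw [decide_eq_decide, hc, PySem.Dict.getD_counter, hmem]
    exact_mod_cast Iff.rfl
  rw [hfil]
  apply PySem.List.sorted_eq_of_perm_of_pairwise_lt
  · apply List.Perm.symm
    apply List.Perm.map
    exact pv_flatMap_filter_perm Prod.snd _ (PySem.Set.nodup_ofList _) _
  · exact List.Pairwise.map _ (fun a b h => h) ((PySem.List.pairwise_lt_enumerate all_text 0).filter _)

-- ===== VERDICT (by name: the statement is the Claim_ definition above) =====
theorem get_page_repetitions_spec : Claim_equal_get_page_repetitions := by
  intro all_text _
  unfold Spec_get_page_repetitions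
  exact get_page_repetitions_eq all_text
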